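-- pv_equiv track=rewrite | github.com/aamott/strawberry-ai-client | src/strawberry/shared/settings/storage.py | env_key_to_namespace
-- ===== SOURCE A (Python) =====
-- from typing import Any, Dict, List, Optional
--
-- def env_key_to_namespace(
--     env_key: str, known_namespaces: list[str]
-- ) -> tuple[Optional[str], str]:
--     """Convert environment variable name back to namespace and key.
--
--     Args:
--         env_key: Environment variable name.
--         known_namespaces: List of registered namespace names.
--
--     Returns:
--         Tuple of (namespace, key) or (None, "") if can't parse.
--     """
--     # Sort by length descending to match most specific namespace first
--     # This prevents ambiguities when one namespace is a prefix of another
--     # e.g., "voice" vs "voice.stt.whisper"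
--     sorted_namespaces = sorted(known_namespaces, key=len, reverse=True)
--
--     for namespace in sorted_namespaces:
--         prefix = namespace.upper().replace(".", "_") + "__"
--         if env_key.startswith(prefix):
--             key = env_key[len(prefix) :].lower().replace("__", ".")
--             return namespace, key
--
--     return None, ""
-- ===== SOURCE B (Python) =====
-- from typing import Optional
--
--
-- def env_key_to_namespace(
--     env_key: str, known_namespaces: list[str]
-- ) -> tuple[Optional[str], str]:
--     """Single linear pass: keep the match with the longest namespace,
--     first-in-list winning ties, instead of sorting by length first."""
--     best_namespace = None
--     best_key = ""
--     best_len = -1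
--     for namespace in known_namespaces:
--         prefix = namespace.upper().replace(".", "_") + "__"
--         if env_key.startswith(prefix) and len(namespace) > best_len:
--             best_namespace = namespace
--             best_key = env_key[len(prefix):].lower().replace("__", ".")
--             best_len = len(namespace)
--     return best_namespace, best_key
-- ===== Notes on version B (the rewrite author's own statement) =====
-- stated objective: simpler
-- what changed: Replaces sort-by-length-descending-then-first-match with a single linear pass that keeps the match with the strictly longest namespace (first in input order on ties), so no sorted copy of the list is built.
import Mathlib
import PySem

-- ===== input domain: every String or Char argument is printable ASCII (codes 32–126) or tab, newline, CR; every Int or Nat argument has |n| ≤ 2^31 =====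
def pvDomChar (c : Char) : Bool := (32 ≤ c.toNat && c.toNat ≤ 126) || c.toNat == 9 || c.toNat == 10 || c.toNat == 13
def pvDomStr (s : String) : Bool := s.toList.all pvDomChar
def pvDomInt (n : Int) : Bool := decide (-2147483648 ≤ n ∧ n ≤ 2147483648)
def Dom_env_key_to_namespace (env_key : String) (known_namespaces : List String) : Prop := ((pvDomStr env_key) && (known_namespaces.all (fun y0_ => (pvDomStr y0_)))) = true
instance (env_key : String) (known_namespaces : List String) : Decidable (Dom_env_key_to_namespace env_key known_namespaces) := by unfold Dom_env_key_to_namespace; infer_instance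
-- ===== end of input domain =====

-- B replaces A's sort-by-length-then-first-match with one linear pass keeping the
-- strictly longest matching namespace (first in input order on ties): simpler, no sorted copy.

-- ===== PORT A =====
-- prefix = namespace.upper().replace(".", "_") + "__"
def pvPrefix (ns : String) : List Char :=
  PySem.Chars.replace (PySem.Chars.upper ns.toList) ['.'] ['_'] ++ ['_', '_']

-- key = env_key[len(prefix):].lower().replace("__", ".")
def pvMkKey (env_key : String) (pfx : List Char) : String :=
  String.ofList (PySem.Chars.replace
    (PySem.Chars.lower (PySem.Chars.slice env_key.toList (some (pfx.length : Int)) none))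
    ['_', '_'] ['.'])

-- A's for-loop over the sorted list: return at the first matching namespace
def pvLoopA (env_key : String) : List String → Option String × String
  | [] => (none, "")
  | ns :: rest =>
    let pfx := pvPrefix ns
    if PySem.Chars.startswith env_key.toList pfx then
      (some ns, pvMkKey env_key pfx)
    else pvLoopA env_key rest

def env_key_to_namespace (env_key : String) (known_namespaces : List String) : Option String × String :=
  pvLoopA env_key (PySem.List.sorted known_namespaces PySem.Str.len true)

-- ===== PORT B =====
-- loop body of Source B: update best state on a strictly longer matching namespace
def pvStepB (env_key : String) (st : Option String × String × Int) (ns : String) :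
    Option String × String × Int :=
  let pfx := pvPrefix ns
  if PySem.Chars.startswith env_key.toList pfx && decide (st.2.2 < PySem.Str.len ns) then
    (some ns, pvMkKey env_key pfx, PySem.Str.len ns)
  else st

def env_key_to_namespace_alt (env_key : String) (known_namespaces : List String) : Option String × String :=
  let r := known_namespaces.foldl (pvStepB env_key) (none, "", -1)
  (r.1, r.2.1)

-- ===== PRECONDITION & SPEC =====
def Spec_env_key_to_namespace (env_key : String) (known_namespaces : List String) (out : Option String × String) : Prop := out = env_key_to_namespace_alt env_key known_namespaces
instance (env_key : String) (known_namespaces : List String) (out : Option String × String) : Decidable (Spec_env_key_to_namespace env_key known_namespaces out) := by unfold Spec_env_key_to_namespace; infer_instance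

-- ===== CLAIM (what is proved, stated in full; the proofs are below) =====
def Claim_equal_env_key_to_namespace : Prop := ∀ (env_key : String) (known_namespaces : List String), Dom_env_key_to_namespace env_key known_namespaces → Spec_env_key_to_namespace env_key known_namespaces (env_key_to_namespace env_key known_namespaces)

-- ===== LEMMAS AND PROOFS =====

-- the matching predicate both programs test
def pvP (env_key : String) (ns : String) : Bool :=
  PySem.Chars.startswith env_key.toList (pvPrefix ns)

-- first element of a list satisfying p
def pvFirst (p : String → Bool) : List String → Option String
  | [] => none
  | x :: xs => if p x then some x else pvFirst p xs

def pvDecode (env_key : String) : Option String → Option String × String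
  | none => (none, "")
  | some m => (some m, pvMkKey env_key (pvPrefix m))

def pvEncode : Option String → Option String × Int
  | none => (none, -1)
  | some m => (some m, PySem.Str.len m)

def pvStepAbs (env_key : String) (st : Option String × Int) (ns : String) : Option String × Int :=
  if pvP env_key ns && decide (st.2 < PySem.Str.len ns) then (some ns, PySem.Str.len ns) else st

def pvH (env_key : String) : Option String × Int → Option String × String × Int
  | (none, n) => (none, "", n)
  | (some m, n) => (some m, pvMkKey env_key (pvPrefix m), n)

theorem pvFirst_cons (p : String → Bool) (x : String) (xs : List String) :
    pvFirst p (x :: xs) = if p x then some x else pvFirst p xs := rfl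

theorem pvLoopA_eq_first (env_key : String) (l : List String) :
    pvLoopA env_key l = pvDecode env_key (pvFirst (pvP env_key) l) := by
  induction l with
  | nil => rfl
  | cons x xs ih =>
    rw [pvFirst_cons]
    by_cases hp : pvP env_key x
    · rw [if_pos hp]
      simp only [pvLoopA, pvP] at hp ⊢
      rw [if_pos hp]
      rfl
    · rw [if_neg hp]
      simp only [pvLoopA, pvP] at hp ⊢
      rw [if_neg hp, ih]

theorem pvFoldB_eq_h (env_key : String) (l : List String) (st : Option String × Int) :
    l.foldl (pvStepB env_key) (pvH env_key st) = pvH env_key (l.foldl (pvStepAbs env_key) st) := by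
  induction l generalizing st with
  | nil => rfl
  | cons x xs ih =>
    have hstep : pvStepB env_key (pvH env_key st) x = pvH env_key (pvStepAbs env_key st x) := by
      obtain ⟨o, n⟩ := st
      cases o with
      | none =>
        show pvStepB env_key (none, "", n) x = pvH env_key (pvStepAbs env_key (none, n) x)
        simp only [pvStepB, pvStepAbs, pvP]
        split_ifs <;> rfl
      | some m =>
        show pvStepB env_key (some m, pvMkKey env_key (pvPrefix m), n) x =
          pvH env_key (pvStepAbs env_key (some m, n) x)
        simp only [pvStepB, pvStepAbs, pvP]
        split_ifs <;> rfl
    rw [List.foldl_cons, hstep, ih, List.foldl_cons]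

theorem pvFirst_mem (p : String → Bool) (l : List String) (m : String)
    (h : pvFirst p l = some m) : m ∈ l := by
  induction l with
  | nil => simp [pvFirst] at h
  | cons x xs ih =>
    rw [pvFirst_cons] at h
    split at h
    · simp_all
    · exact List.mem_cons_of_mem _ (ih h)

-- inserting x into a length-descending list: effect on the first match
theorem pvFirst_insertBy (env_key : String) (x : String) (l : List String)
    (hp : l.Pairwise (fun a b => PySem.Str.len b ≤ PySem.Str.len a)) :
    pvFirst (pvP env_key) (PySem.List.insertBy (fun a b => decide (PySem.Str.len b < PySem.Str.len a)) x l) =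
      if pvP env_key x then
        (match pvFirst (pvP env_key) l with
          | none => some x
          | some m => if PySem.Str.len m < PySem.Str.len x then some x else some m)
      else pvFirst (pvP env_key) l := by
  induction l with
  | nil =>
    show pvFirst (pvP env_key) [x] = _
    rw [pvFirst_cons]
    split <;> rfl
  | cons y ys ih =>
    rcases List.pairwise_cons.mp hp with ⟨hy, hys⟩
    show pvFirst (pvP env_key)
        (if decide (PySem.Str.len y < PySem.Str.len x) = true then x :: y :: ys
         else y :: PySem.List.insertBy (fun a b => decide (PySem.Str.len b < PySem.Str.len a)) x ys) = _
    by_cases hlt : PySem.Str.len y < PySem.Str.len x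
    · rw [if_pos (by simpa using hlt), pvFirst_cons]
      by_cases hpx : pvP env_key x
      · rw [if_pos hpx, if_pos hpx]
        cases hfo : pvFirst (pvP env_key) (y :: ys) with
        | none => rfl
        | some m =>
          have hm : m ∈ y :: ys := pvFirst_mem _ _ _ hfo
          have hmy : PySem.Str.len m ≤ PySem.Str.len y := by
            rcases List.mem_cons.mp hm with h | h
            · simp [h]
            · exact hy m h
          have hmx : PySem.Str.len m < PySem.Str.len x := lt_of_le_of_lt hmy hlt
          show some x = if PySem.Str.len m < PySem.Str.len x then some x else some m
          rw [if_pos hmx]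
      · rw [if_neg hpx, if_neg hpx]
    · rw [if_neg (by simpa using hlt), pvFirst_cons, pvFirst_cons]
      by_cases hpy : pvP env_key y
      · rw [if_pos hpy, if_pos hpy]
        by_cases hpx : pvP env_key x
        · rw [if_pos hpx]
          show some y = if PySem.Str.len y < PySem.Str.len x then some x else some y
          rw [if_neg hlt]
        · rw [if_neg hpx]
      · rw [if_neg hpy, if_neg hpy, ih hys]

theorem pvLen_nonneg (s : String) : 0 ≤ PySem.Str.len s := by
  simp [PySem.Str.len_eq]

-- one pass of B's abstract state = first match of the stable descending sort
theorem pvMain (env_key : String) (xs : List String) :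
    xs.foldl (pvStepAbs env_key) (none, -1) =
      pvEncode (pvFirst (pvP env_key) (PySem.List.sorted xs PySem.Str.len true)) := by
  induction xs using List.reverseRecOn with
  | nil => rfl
  | append_singleton xs x ih =>
    have hsort : PySem.List.sorted (xs ++ [x]) PySem.Str.len true =
        PySem.List.insertBy (fun a b => decide (PySem.Str.len b < PySem.Str.len a)) x
          (PySem.List.sorted xs PySem.Str.len true) := by
      rw [PySem.List.sorted_rev_eq_foldl_insertBy, PySem.List.sorted_rev_eq_foldl_insertBy,
        List.foldl_append]
      rfl
    rw [List.foldl_append, ih, hsort,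
      pvFirst_insertBy env_key x _ (PySem.List.sorted_pairwise_rev xs PySem.Str.len),
      List.foldl_cons, List.foldl_nil]
    by_cases hpx : pvP env_key x
    · rw [if_pos hpx]
      cases hfo : pvFirst (pvP env_key) (PySem.List.sorted xs PySem.Str.len true) with
      | none =>
        show pvStepAbs env_key (none, -1) x = pvEncode (some x)
        have hg : (pvP env_key x && decide (((none, -1) : Option String × Int).2 < PySem.Str.len x)) = true := by
          have h0 := pvLen_nonneg x
          rw [hpx]
          simp only [Bool.true_and, decide_eq_true_eq]
          omega
        rw [pvStepAbs, if_pos hg]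
        rfl
      | some m =>
        show pvStepAbs env_key (pvEncode (some m)) x =
          pvEncode (if PySem.Str.len m < PySem.Str.len x then some x else some m)
        by_cases hlt : PySem.Str.len m < PySem.Str.len x
        · rw [if_pos hlt]
          have hg : (pvP env_key x && decide ((pvEncode (some m)).2 < PySem.Str.len x)) = true := by
            rw [hpx]
            simp only [pvEncode, Bool.true_and, decide_eq_true_eq]
            exact hlt
          rw [pvStepAbs, if_pos hg]
          rfl
        · rw [if_neg hlt]
          have hg : ¬ ((pvP env_key x && decide ((pvEncode (some m)).2 < PySem.Str.len x)) = true) := by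
            simp only [pvEncode, Bool.and_eq_true, decide_eq_true_eq, not_and]
            intro _
            exact hlt
          rw [pvStepAbs, if_neg hg]
    · rw [if_neg hpx]
      have hg : ∀ st : Option String × Int, pvStepAbs env_key st x = st := by
        intro st
        rw [pvStepAbs, if_neg (by simp [hpx])]
      rw [hg]

-- ===== VERDICT (by name: the statement is the Claim_ definition above) =====
theorem env_key_to_namespace_spec : Claim_equal_env_key_to_namespace := by
  intro env_key known _
  unfold Spec_env_key_to_namespace env_key_to_namespace env_key_to_namespace_alt
  have hB : known.foldl (pvStepB env_key) (none, "", -1) =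
      pvH env_key (known.foldl (pvStepAbs env_key) (none, -1)) := by
    have h := pvFoldB_eq_h env_key known (none, -1)
    simpa [pvH] using h
  rw [pvLoopA_eq_first, hB, pvMain]
  cases pvFirst (pvP env_key) (PySem.List.sorted known PySem.Str.len true) <;> rfl
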